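-- pv_equiv track=rewrite | github.com/RickMolenaar/AdventOfCode2025 | day03.py | solve
-- ===== SOURCE A (Python) =====
-- def solve(inp: list[list[int]], part, example):
--     tot = 0
--     for bank in inp:
--         highest = max(bank)
--         if bank.index(highest) == len(bank) - 1:
--             for v in range(highest - 1, 0, -1):
--                 if v in bank:
--                     tot += int(str(v) + str(highest))
--                     break
--         else:
--             if bank.count(highest) > 1:
--                 tot += int(str(highest) + str(highest))
--             else:
--                 for v in range(highest - 1, 0, -1):
--                     if v in bank[bank.index(highest) + 1:]:
--                         tot += int(str(highest) + str(v))
--                         break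
--     return tot
-- ===== SOURCE B (Python) =====
-- def solve(inp: list[list[int]], part, example):
--     tot = 0
--     for bank in inp:
--         h = max(bank)
--         i = bank.index(h)
--         if i == len(bank) - 1:
--             cands = [v for v in bank if 0 < v < h]
--             if cands:
--                 tot += int(str(max(cands)) + str(h))
--         elif bank.count(h) > 1:
--             tot += int(str(h) + str(h))
--         else:
--             cands = [v for v in bank[i + 1:] if 0 < v < h]
--             if cands:
--                 tot += int(str(h) + str(max(cands)))
--     return tot
-- ===== Notes on version B (the rewrite author's own statement) =====
-- stated objective: faster
-- what changed: Per bank, instead of scanning the whole value range max(bank)-1..1 and testing membership of each value, B filters the relevant elements once and takes their max, removing the O(maxval) inner value scan.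
import Mathlib
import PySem

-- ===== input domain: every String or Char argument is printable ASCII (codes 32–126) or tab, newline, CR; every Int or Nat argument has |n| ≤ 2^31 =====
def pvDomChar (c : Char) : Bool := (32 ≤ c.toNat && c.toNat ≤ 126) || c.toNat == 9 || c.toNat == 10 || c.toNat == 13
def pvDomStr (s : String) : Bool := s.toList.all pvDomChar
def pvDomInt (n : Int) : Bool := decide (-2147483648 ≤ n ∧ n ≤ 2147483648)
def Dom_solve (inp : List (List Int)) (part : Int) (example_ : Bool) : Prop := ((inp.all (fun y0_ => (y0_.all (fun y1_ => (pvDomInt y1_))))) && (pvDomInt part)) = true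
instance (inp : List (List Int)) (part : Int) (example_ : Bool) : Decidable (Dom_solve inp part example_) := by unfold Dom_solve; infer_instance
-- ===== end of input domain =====

-- B replaces A's descending scan over the value range (membership test per value) by a single
-- filter-and-max pass over the bank's elements; measured objective: faster (asymptotic).

-- int(str(a) + str(b)), computed identically by Source A and Source B; Python raises ValueError when the
-- concatenation is not int-parsable (only reachable with a negative maximum, excluded by
-- Pre_solve); the port returns 0 there.
def pyCat (a b : Int) : Int := (PySem.Int.ofStr? (PySem.Int.toStr a ++ PySem.Int.toStr b)).getD 0

-- ===== PORT A =====

-- the 'for v in range(...): if v in bank: tot += ...; break' loop, as a first-hit search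
def firstHitA (vs : List Int) (bank : List Int) : Option Int :=
  match vs with
  | [] => none
  | v :: rest => if bank.contains v then some v else firstHitA rest bank

def bankTotA (tot : Int) (bank : List Int) : Int :=
  match PySem.List.max? bank (fun x => x) with
  | none => tot   -- Python: max([]) raises ValueError; excluded by Pre_solve
  | some highest =>
    if ((PySem.List.index? bank highest).getD 0 : Int) = (bank.length : Int) - 1 then
      match firstHitA (PySem.List.pyRange (highest - 1) 0 (-1)) bank with
      | some v => tot + pyCat v highest
      | none => tot
    else if 1 < PySem.List.count bank highest then
      tot + pyCat highest highest
    else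
      match firstHitA (PySem.List.pyRange (highest - 1) 0 (-1))
              (PySem.List.slice bank (some (((PySem.List.index? bank highest).getD 0 : Int) + 1)) none) with
      | some v => tot + pyCat highest v
      | none => tot

def solve (inp : List (List Int)) (part : Int) (example_ : Bool) : Int :=
  inp.foldl bankTotA 0

-- ===== PORT B =====

def bankTotB (tot : Int) (bank : List Int) : Int :=
  match PySem.List.max? bank (fun x => x) with
  | none => tot   -- Python: max([]) raises ValueError; excluded by Pre_solve
  | some h =>
    let i : Int := ((PySem.List.index? bank h).getD 0 : Int)
    if i = (bank.length : Int) - 1 then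
      let cands := bank.filter (fun v => decide (0 < v) && decide (v < h))
      match PySem.List.max? cands (fun x => x) with
      | some m => tot + pyCat m h
      | none => tot
    else if 1 < PySem.List.count bank h then
      tot + pyCat h h
    else
      let cands := (PySem.List.slice bank (some (i + 1)) none).filter (fun v => decide (0 < v) && decide (v < h))
      match PySem.List.max? cands (fun x => x) with
      | some m => tot + pyCat h m
      | none => tot

def solve_alt (inp : List (List Int)) (part : Int) (example_ : Bool) : Int :=
  inp.foldl bankTotB 0

-- ===== PRECONDITION & SPEC =====
-- Pre_ excludes exactly the inputs where Python A raises: an empty bank (max([]) is a ValueError)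
-- and a bank whose maximum is negative and occurs more than once (int(str(h)+str(h)) is a ValueError).
def Pre_solve (inp : List (List Int)) (part : Int) (example_ : Bool) : Prop :=
  ∀ bank ∈ inp, bank ≠ [] ∧
    ¬ ((PySem.List.max? bank (fun x => x)).getD 0 < 0 ∧
       1 < PySem.List.count bank ((PySem.List.max? bank (fun x => x)).getD 0))
instance (inp : List (List Int)) (part : Int) (example_ : Bool) : Decidable (Pre_solve inp part example_) := by
  unfold Pre_solve; infer_instance

def pvWitness_solve : List (List Int) × Int × Bool := ([[3, 7], [5, 5, 2]], 1, false)

def Spec_solve (inp : List (List Int)) (part : Int) (example_ : Bool) (out : Int) : Prop := out = solve_alt inp part example_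
instance (inp : List (List Int)) (part : Int) (example_ : Bool) (out : Int) : Decidable (Spec_solve inp part example_ out) := by unfold Spec_solve; infer_instance

-- ===== CLAIM (what is proved, stated in full; the proofs are below) =====
def Claim_equal_solve : Prop := ∀ (inp : List (List Int)) (part : Int) (example_ : Bool), Dom_solve inp part example_ → Pre_solve inp part example_ → Spec_solve inp part example_ (solve inp part example_)

-- ===== LEMMAS AND PROOFS =====

-- if n is a member and an upper bound, max? l id = some n
theorem max?_eq_of_mem_of_ub (l : List Int) (n : Int) (hmem : n ∈ l)
    (hub : ∀ y ∈ l, y ≤ n) : PySem.List.max? l (fun x => x) = some n := by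
  cases hl : PySem.List.max? l (fun x => x) with
  | none =>
      rw [PySem.List.max?_eq_none_iff] at hl
      simp [hl] at hmem
  | some m =>
      have hm : m ∈ l := PySem.List.max?_mem hl
      have h1 : m ≤ n := hub m hm
      have h2 : n ≤ m := PySem.List.max?_isMax hl n hmem
      exact congrArg some (le_antisymm h1 h2)

-- A's first hit over range(n, 0, -1) is the max of the elements in (0, n]
theorem firstHit_eq_max (n : Int) (xs : List Int) :
    firstHitA (PySem.List.pyRange n 0 (-1)) xs
      = PySem.List.max? (xs.filter (fun v => decide (0 < v) && decide (v ≤ n))) (fun x => x) := by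
  have key : ∀ (k : Nat) (n : Int), n.toNat = k →
      firstHitA (PySem.List.pyRange n 0 (-1)) xs
        = PySem.List.max? (xs.filter (fun v => decide (0 < v) && decide (v ≤ n))) (fun x => x) := by
    intro k
    induction k with
    | zero =>
        intro n hn
        have hle : n ≤ 0 := by omega
        rw [PySem.List.pyRange_neg_one_eq_nil hle]
        have : xs.filter (fun v => decide (0 < v) && decide (v ≤ n)) = [] := by
          rw [List.filter_eq_nil_iff]
          intro v _; simp; omega
        rw [this]
        show (none : Option Int) = _
        symm
        rw [PySem.List.max?_eq_none_iff]
    | succ k ih =>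
        intro n hn
        have hpos : (0 : Int) < n := by omega
        rw [PySem.List.pyRange_neg_one_cons hpos]
        by_cases hmem : n ∈ xs
        · have hc : xs.contains n = true := by simpa using hmem
          simp only [firstHitA, hc]
          rw [if_pos trivial]
          refine (max?_eq_of_mem_of_ub _ n ?_ ?_).symm
          · rw [List.mem_filter]; constructor
            · exact hmem
            · simp; omega
          · intro y hy
            rw [List.mem_filter] at hy
            have := hy.2; simp at this; omega
        · have hc : xs.contains n = false := by simpa using hmem
          simp only [firstHitA, hc]
          rw [if_neg (by simp)]
          rw [ih (n - 1) (by omega)]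
          congr 1
          apply List.filter_congr
          intro v hv
          have hvne : v ≠ n := fun h => hmem (h ▸ hv)
          congr 1
          simp only [decide_eq_decide]
          omega
  exact key n.toNat n rfl

-- predicate bridge: v ≤ h - 1 ↔ v < h
theorem filter_lt_eq (h : Int) (xs : List Int) :
    xs.filter (fun v => decide (0 < v) && decide (v ≤ h - 1))
      = xs.filter (fun v => decide (0 < v) && decide (v < h)) := by
  apply List.filter_congr
  intro v _
  congr 1
  simp only [decide_eq_decide]
  omega

theorem bankTot_eq (tot : Int) (bank : List Int) : bankTotA tot bank = bankTotB tot bank := by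
  unfold bankTotA bankTotB
  cases hm : PySem.List.max? bank (fun x => x) with
  | none => rfl
  | some h =>
    simp only [firstHit_eq_max, filter_lt_eq]

theorem solve_eq_foldl (inp : List (List Int)) (t : Int) :
    inp.foldl bankTotA t = inp.foldl bankTotB t := by
  induction inp generalizing t with
  | nil => rfl
  | cons b bs ih => simp only [List.foldl_cons, bankTot_eq, ih]

-- ===== VERDICT (by name: the statement is the Claim_ definition above) =====
theorem solve_spec : Claim_equal_solve := by
  intro inp part example_ _ _
  unfold Spec_solve solve solve_alt
  exact solve_eq_foldl inp 0
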